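-- pv_equiv track=rewrite | github.com/power080900/coding_prac | LV1/Rest_in_park.py | solution
-- ===== SOURCE A (Python) =====
-- def solution(mats, park):
--     mats.sort(reverse = True)
--     H, W = len(park), len(park[0])
--     dp = [[0] * W for _ in range(H)]
--     max_size = 0
--     answer = -1
--     if mats[-1] > H or mats[-1] > W:
--         return answer
--     else:
--         for i in range(H):
--             for j in range(W):
--                 if park[i][j] == "-1":
--                     if i == 0 or j == 0 :
--                         dp[i][j] = 1
--                     else:
--                         dp[i][j] = min(dp[i-1][j], dp[i][j-1], dp[i-1][j-1]) + 1
--                     max_size = max(max_size, dp[i][j])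
--
--         if max_size < mats[-1]:
--             return answer
--         else:
--             for mat in mats:
--                 if max_size >= mat:
--                     return mat
-- ===== SOURCE B (Python) =====
-- def solution(mats, park):
--     mats.sort(reverse=True)
--     H, W = len(park), len(park[0])
--     smallest = mats[-1]
--     if smallest > H or smallest > W:
--         return -1
--
--     def full_square(i, j, k):
--         # top-left corner (i, j), side k: every cell must be "-1"
--         return all(park[i + a][j + b] == "-1"
--                    for a in range(k) for b in range(k))
--
--     def any_square(k):
--         return any(full_square(i, j, k)
--                    for i in range(H - k + 1) for j in range(W - k + 1))
--
--     # largest side with an all-empty square: grow k while such a square exists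
--     max_size = 0
--     for k in range(1, min(H, W) + 1):
--         if any_square(k):
--             max_size = k
--         else:
--             break
--
--     if max_size < smallest:
--         return -1
--     for mat in mats:
--         if max_size >= mat:
--             return mat
-- ===== Notes on version B (the rewrite author's own statement) =====
-- stated objective: alternative
-- what changed: Replaces A's maximal-square dynamic-programming table (dp[i][j] = min of three neighbours + 1, with a running maximum) by a direct search: grow the candidate side k from 1 and keep the last k for which some k-by-k all-empty block exists; the sort-and-pick phase over mats is kept.
import Mathlib
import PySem

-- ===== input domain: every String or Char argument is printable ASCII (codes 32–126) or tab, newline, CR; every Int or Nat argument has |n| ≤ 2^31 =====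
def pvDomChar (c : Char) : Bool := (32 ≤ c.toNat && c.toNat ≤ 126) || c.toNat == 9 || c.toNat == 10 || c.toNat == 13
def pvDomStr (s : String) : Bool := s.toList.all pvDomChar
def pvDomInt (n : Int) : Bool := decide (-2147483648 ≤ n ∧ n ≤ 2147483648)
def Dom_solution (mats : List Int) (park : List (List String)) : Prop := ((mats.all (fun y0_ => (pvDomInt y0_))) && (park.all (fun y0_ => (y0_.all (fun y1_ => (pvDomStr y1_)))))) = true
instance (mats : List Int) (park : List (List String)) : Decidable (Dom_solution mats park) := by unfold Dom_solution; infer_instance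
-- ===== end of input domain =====

-- B replaces A's maximal-square DP table by a growing scan over candidate sides with a direct
-- all-empty block test, stopping at the first side with no block (objective: alternative algorithm). Both the Python A and the
-- Python B sort `mats` in place (same observable mutation); the theorems are about the return value.


-- ===== PORT A =====
-- park[i][j] and dp[i][j] (shared Python indexing, total form; Pre_ keeps the Python's reads in range)
def pyCell (park : List (List String)) (i j : Int) : String :=
  PySem.List.pyGetD (PySem.List.pyGetD park i []) j ""

def dpGet (dp : List (List Int)) (i j : Int) : Int :=
  PySem.List.pyGetD (PySem.List.pyGetD dp i []) j 0

-- the body of A's inner 'for j in range(W)' loop, on the state (dp, max_size)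
def innerStep (park : List (List String)) (i : Int) (st : List (List Int) × Int) (j : Int) :
    List (List Int) × Int :=
  if pyCell park i j == "-1" then
    let v : Int := if i == 0 || j == 0 then 1
      else min (min (dpGet st.1 (i-1) j) (dpGet st.1 i (j-1))) (dpGet st.1 (i-1) (j-1)) + 1
    (PySem.List.pySetD st.1 i (PySem.List.pySetD (PySem.List.pyGetD st.1 i []) j v), max st.2 v)
  else st

def solution (mats : List Int) (park : List (List String)) : Int :=
  let msorted := PySem.List.sorted mats (fun x => x) true
  let H : Int := PySem.List.len park
  let W : Int := PySem.List.len (PySem.List.pyGetD park 0 [])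
  let dp0 : List (List Int) := (PySem.List.pyRange 0 H 1).map (fun _ => PySem.List.pyRepeat [(0 : Int)] W)
  let last := PySem.List.pyGetD msorted (-1) 0
  if last > H ∨ last > W then -1
  else
    let st := (PySem.List.pyRange 0 H 1).foldl (fun st i =>
      (PySem.List.pyRange 0 W 1).foldl (innerStep park i) st) (dp0, (0 : Int))
    if st.2 < last then -1
    else (msorted.find? (fun mat => decide (st.2 ≥ mat))).getD (-1)

-- ===== PORT B =====
-- B's helper full_square(i, j, k): the k×k block with top-left (i, j) is all '-1'
def fullSquareB (park : List (List String)) (i j k : Int) : Bool :=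
  (PySem.List.pyRange 0 k 1).all (fun a => (PySem.List.pyRange 0 k 1).all (fun b =>
    pyCell park (i + a) (j + b) == "-1"))

-- B's helper any_square(k): some k×k all-empty block exists
def anySquareB (park : List (List String)) (H W k : Int) : Bool :=
  (PySem.List.pyRange 0 (H - k + 1) 1).any (fun i =>
    (PySem.List.pyRange 0 (W - k + 1) 1).any (fun j => fullSquareB park i j k))

def solution_alt (mats : List Int) (park : List (List String)) : Int :=
  let msorted := PySem.List.sorted mats (fun x => x) true
  let H : Int := PySem.List.len park
  let W : Int := PySem.List.len (PySem.List.pyGetD park 0 [])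
  let smallest := PySem.List.pyGetD msorted (-1) 0
  if smallest > H ∨ smallest > W then -1
  else
    let maxSize : Int := ((PySem.List.pyRange (min H W) 0 (-1)).find? (anySquareB park H W)).getD 0
    if maxSize < smallest then -1
    else (msorted.find? (fun mat => decide (maxSize ≥ mat))).getD (-1)

-- ===== PRECONDITION & SPEC =====
-- Pre_ excludes exactly the inputs where Python A raises IndexError: empty mats / empty park,
-- and (when the smallest mat fits, so the DP loop runs) a ragged park with some row shorter than the first.
def Pre_solution (mats : List Int) (park : List (List String)) : Prop :=
  mats ≠ [] ∧ park ≠ [] ∧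
  ((∃ m ∈ mats, m ≤ (park.length : Int) ∧ m ≤ ((park.headD []).length : Int)) →
    ∀ row ∈ park, (park.headD []).length ≤ row.length)
instance (mats : List Int) (park : List (List String)) : Decidable (Pre_solution mats park) := by
  unfold Pre_solution; infer_instance
def pvWitness_solution : List Int × List (List String) := ([2, 1], [["-1", "-1"], ["-1", "x"]])

def Spec_solution (mats : List Int) (park : List (List String)) (out : Int) : Prop := out = solution_alt mats park
instance (mats : List Int) (park : List (List String)) (out : Int) : Decidable (Spec_solution mats park out) := by unfold Spec_solution; infer_instance

-- ===== CLAIM (what is proved, stated in full; the proofs are below) =====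
def Claim_equal_solution : Prop := ∀ (mats : List Int) (park : List (List String)), Dom_solution mats park → Pre_solution mats park → Spec_solution mats park (solution mats park)

-- ===== LEMMAS AND PROOFS =====
def cellE (park : List (List String)) (i j : Nat) : Bool :=
  ((park.getD i []).getD j "") == "-1"

def sRec (park : List (List String)) (i j : Nat) : Nat :=
  if cellE park i j then
    if _h : i = 0 ∨ j = 0 then 1
    else min (min (sRec park (i-1) j) (sRec park i (j-1))) (sRec park (i-1) (j-1)) + 1
  else 0
termination_by i + j
decreasing_by all_goals omega

def sqE (park : List (List String)) (i j k : Nat) : Prop :=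
  k ≤ i + 1 ∧ k ≤ j + 1 ∧ ∀ a < k, ∀ b < k, cellE park (i - a) (j - b) = true

theorem sRec_le (park : List (List String)) (i j : Nat) : sRec park i j ≤ min i j + 1 := by
  unfold sRec
  split
  · split
    · omega
    · have h1 := sRec_le park (i-1) j
      have h2 := sRec_le park i (j-1)
      omega
  · omega
termination_by i + j
decreasing_by all_goals omega

theorem sqE_mono (park : List (List String)) {i j k k' : Nat} (h : sqE park i j k') (hk : k ≤ k') :
    sqE park i j k := by
  obtain ⟨h1, h2, h3⟩ := h
  exact ⟨by omega, by omega, fun a ha b hb => h3 a (by omega) b (by omega)⟩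

theorem sqE_sRec (park : List (List String)) (i j : Nat) : sqE park i j (sRec park i j) := by
  unfold sRec
  split
  · rename_i hc
    split
    · rename_i h0
      refine ⟨by omega, by omega, fun a ha b hb => ?_⟩
      interval_cases a <;> interval_cases b <;> simpa using hc
    · rename_i h0
      push Not at h0
      have hA := sqE_sRec park (i-1) j
      have hB := sqE_sRec park i (j-1)
      have hC := sqE_sRec park (i-1) (j-1)
      set m := min (min (sRec park (i-1) j) (sRec park i (j-1))) (sRec park (i-1) (j-1)) with hm
      have hCm : sqE park (i-1) (j-1) m := sqE_mono park hC (by omega)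
      have hAm : sqE park (i-1) j m := sqE_mono park hA (by omega)
      have hBm : sqE park i (j-1) m := sqE_mono park hB (by omega)
      refine ⟨by have := hAm.1; omega, by have := hBm.2.1; omega, fun a ha b hb => ?_⟩
      by_cases haz : a = 0
      · by_cases hbz : b = 0
        · simpa [haz, hbz] using hc
        · -- a = 0, b ≥ 1: inside the left square at (i, j-1), offsets (0, b-1)
          have := hBm.2.2 0 (by omega) (b-1) (by omega)
          simpa [haz, show j - 1 - (b-1) = j - b by omega] using this
      · by_cases hbz : b = 0
        · have := hAm.2.2 (a-1) (by omega) 0 (by omega)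
          simpa [hbz, show i - 1 - (a-1) = i - a by omega] using this
        · have := hCm.2.2 (a-1) (by omega) (b-1) (by omega)
          simpa [show i - 1 - (a-1) = i - a by omega, show j - 1 - (b-1) = j - b by omega] using this
  · rename_i hc
    exact ⟨by omega, by omega, fun a ha b hb => by omega⟩
termination_by i + j
decreasing_by all_goals omega

theorem le_sRec (park : List (List String)) (i j k : Nat) (h : sqE park i j k) :
    k ≤ sRec park i j := by
  rcases Nat.eq_zero_or_pos k with hk | hk
  · omega
  · obtain ⟨h1, h2, h3⟩ := h
    have hc : cellE park i j = true := by simpa using h3 0 (by omega) 0 (by omega)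
    unfold sRec
    rw [if_pos hc]
    split
    · omega
    · rename_i h0
      push Not at h0
      have mkA : sqE park (i-1) j (k-1) := by
        refine ⟨by omega, by omega, fun a ha b hb => ?_⟩
        have := h3 (a+1) (by omega) b (by omega)
        simpa [show i - (a+1) = i - 1 - a by omega] using this
      have mkB : sqE park i (j-1) (k-1) := by
        refine ⟨by omega, by omega, fun a ha b hb => ?_⟩
        have := h3 a (by omega) (b+1) (by omega)
        simpa [show j - (b+1) = j - 1 - b by omega] using this
      have mkC : sqE park (i-1) (j-1) (k-1) := by
        refine ⟨by omega, by omega, fun a ha b hb => ?_⟩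
        have := h3 (a+1) (by omega) (b+1) (by omega)
        simpa [show i - (a+1) = i - 1 - a by omega, show j - (b+1) = j - 1 - b by omega] using this
      have iA := le_sRec park (i-1) j (k-1) mkA
      have iB := le_sRec park i (j-1) (k-1) mkB
      have iC := le_sRec park (i-1) (j-1) (k-1) mkC
      omega
termination_by i + j
decreasing_by all_goals omega
def tabDp (park : List (List String)) (H W i j : Nat) : List (List Int) :=
  (List.range H).map (fun r => (List.range W).map (fun c =>
    if r < i ∨ (r = i ∧ c < j) then (sRec park r c : Int) else 0))

theorem tab_getD_row (park : List (List String)) (H W i j r : Nat) (hr : r < H) :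
    (tabDp park H W i j).getD r []
      = (List.range W).map (fun c => if r < i ∨ (r = i ∧ c < j) then (sRec park r c : Int) else 0) :=
  PySem.List.getD_map_range _ _ _ _ hr

theorem tab_getD (park : List (List String)) (H W i j r c : Nat) (hr : r < H) (hc : c < W) :
    ((tabDp park H W i j).getD r []).getD c 0
      = if r < i ∨ (r = i ∧ c < j) then (sRec park r c : Int) else 0 := by
  rw [tab_getD_row park H W i j r hr, PySem.List.getD_map_range _ _ _ _ hc]

theorem sRec_of_cell_false (park : List (List String)) (i j : Nat) (hc : cellE park i j = false) :
    sRec park i j = 0 := by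
  unfold sRec; simp [hc]

theorem tab_succ_col (park : List (List String)) (H W i j : Nat) (hij : cellE park i j = false ∨ j ≥ W) :
    tabDp park H W i j = tabDp park H W i (j+1) := by
  unfold tabDp
  apply List.map_congr_left
  intro r _
  apply List.map_congr_left
  intro c hcW
  rw [List.mem_range] at hcW
  by_cases h : r < i ∨ (r = i ∧ c < j)
  · rw [if_pos h, if_pos (by omega)]
  · rw [if_neg h]
    by_cases h2 : r < i ∨ (r = i ∧ c < j + 1)
    · rw [if_pos h2]
      have hrc : r = i ∧ c = j := by omega
      rcases hij with hc | hc
      · rw [hrc.1, hrc.2, sRec_of_cell_false park i j hc]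
        simp
      · omega
    · rw [if_neg h2]

theorem sRec_pos_eq (park : List (List String)) (i j : Nat) (hc : cellE park i j = true)
    (h0 : ¬(i = 0 ∨ j = 0)) :
    sRec park i j
      = min (min (sRec park (i-1) j) (sRec park i (j-1))) (sRec park (i-1) (j-1)) + 1 := by
  conv_lhs => rw [sRec]
  rw [if_pos hc, dif_neg h0]

theorem tab_set (park : List (List String)) (H W i j : Nat) :
    (tabDp park H W i j).set i
        (((List.range W).map (fun c => if i < i ∨ (i = i ∧ c < j) then (sRec park i c : Int) else 0)).set j
          ((sRec park i j : Nat) : Int))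
      = tabDp park H W i (j+1) := by
  apply List.ext_getElem
  · simp [tabDp]
  · intro r hr1 hr2
    have hrH : r < H := by
      simp only [tabDp, List.length_map, List.length_range] at hr2
      exact hr2
    simp only [tabDp, List.getElem_set, List.getElem_map, List.getElem_range]
    by_cases hir : i = r
    · subst hir
      rw [if_pos rfl]
      simp only [true_and, lt_self_iff_false, false_or]
      apply List.ext_getElem
      · simp
      · intro c hc1 hc2
        have hcW : c < W := by simpa using hc1
        simp only [List.getElem_set, List.getElem_map, List.getElem_range]
        by_cases hcj : j = c
        · rw [if_pos hcj, hcj, if_pos (Nat.lt_succ_self c)]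
        · rw [if_neg hcj]
          split_ifs <;> first | rfl | (exfalso; omega)
    · rw [if_neg hir]
      apply List.map_congr_left
      intro c _
      split_ifs <;> first | rfl | (exfalso; omega)

theorem innerStep_eval (park : List (List String)) (H W i j : Nat) (hi : i < H) (hj : j < W)
    (m : Nat) :
    innerStep park (i : Int) (tabDp park H W i j, (m : Int)) (j : Int)
      = (tabDp park H W i (j+1), ((max m (sRec park i j) : Nat) : Int)) := by
  have hcell : pyCell park (i : Int) (j : Int) = (park.getD i []).getD j "" := by
    unfold pyCell
    rw [PySem.List.pyGetD_natCast, PySem.List.pyGetD_natCast]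
  by_cases hc : cellE park i j
  · have hc' : ((park.getD i []).getD j "" == "-1") = true := hc
    have hv : (if (i : Int) == 0 || (j : Int) == 0 then (1:Int)
        else min (min (dpGet (tabDp park H W i j) ((i:Int)-1) (j:Int))
                     (dpGet (tabDp park H W i j) (i:Int) ((j:Int)-1)))
                 (dpGet (tabDp park H W i j) ((i:Int)-1) ((j:Int)-1)) + 1)
        = ((sRec park i j : Nat) : Int) := by
      by_cases h0 : i = 0 ∨ j = 0
      · have hb : ((i : Int) == 0 || (j : Int) == 0) = true := by
          rcases h0 with h | h <;> simp [h]
        rw [if_pos hb]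
        unfold sRec
        rw [if_pos hc, dif_pos h0]
        norm_num
      · have hi0 : i ≠ 0 := fun h => h0 (Or.inl h)
        have hj0 : j ≠ 0 := fun h => h0 (Or.inr h)
        have hb : ((i : Int) == 0 || (j : Int) == 0) = false := by simp [hi0, hj0]
        rw [if_neg (by simp [hb])]
        have e1 : ((i : Int) - 1) = ((i - 1 : Nat) : Int) := by omega
        have e2 : ((j : Int) - 1) = ((j - 1 : Nat) : Int) := by omega
        unfold dpGet
        rw [e1, e2]
        simp only [PySem.List.pyGetD_natCast]
        rw [tab_getD park H W i j (i-1) j (by omega) hj,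
            tab_getD park H W i j i (j-1) hi (by omega),
            tab_getD park H W i j (i-1) (j-1) (by omega) (by omega)]
        rw [if_pos (show i-1 < i ∨ (i-1 = i ∧ j < j) by omega),
            if_pos (show i < i ∨ (i = i ∧ j-1 < j) by omega),
            if_pos (show i-1 < i ∨ (i-1 = i ∧ j-1 < j) by omega)]
        rw [sRec_pos_eq park i j hc h0]
        push_cast
        omega
    simp only [innerStep, hcell, hc', if_true]
    rw [hv, Prod.mk.injEq]
    refine ⟨?_, ?_⟩
    · rw [PySem.List.pyGetD_natCast, tab_getD_row park H W i j i hi,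
          PySem.List.pySetD_natCast, PySem.List.pySetD_natCast]
      exact tab_set park H W i j
    · push_cast
      rfl
  · have hc' : ((park.getD i []).getD j "" == "-1") = false := by
      simpa [cellE] using hc
    simp only [innerStep, hcell, hc', Bool.false_eq_true, if_false]
    rw [tab_succ_col park H W i j (Or.inl (by simpa using hc))]
    rw [sRec_of_cell_false park i j (by simpa using hc)]
    simp


theorem tab_row_roll (park : List (List String)) (H W i : Nat) :
    tabDp park H W i W = tabDp park H W (i+1) 0 := by
  unfold tabDp
  apply List.map_congr_left
  intro r _
  apply List.map_congr_left
  intro c hcW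
  rw [List.mem_range] at hcW
  have hiff : (r < i ∨ (r = i ∧ c < W)) ↔ (r < i + 1 ∨ (r = i + 1 ∧ c < 0)) := by
    constructor
    · rintro (h | ⟨h, -⟩)
      · exact Or.inl (by omega)
      · exact Or.inl (by omega)
    · rintro (h | ⟨-, h⟩)
      · rcases Nat.lt_or_ge r i with h2 | h2
        · exact Or.inl h2
        · exact Or.inr ⟨by omega, hcW⟩
      · omega
  rw [if_congr hiff rfl rfl]

theorem innerLoop (park : List (List String)) (H W i : Nat) (hi : i < H) :
    ∀ (t j m : Nat), j + t = W →
    (PySem.List.pyRange (j : Int) (W : Int) 1).foldl (innerStep park (i : Int))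
        (tabDp park H W i j, ((m : Nat) : Int))
      = (tabDp park H W i W,
          (((List.range' j t).foldl (fun m c => max m (sRec park i c)) m : Nat) : Int)) := by
  intro t
  induction t with
  | zero =>
    intro j m hj
    have hjW : j = W := by omega
    subst hjW
    rw [PySem.List.pyRange_one_eq_nil le_rfl]
    simp [List.range']
  | succ t ih =>
    intro j m hj
    have hjW : j < W := by omega
    rw [PySem.List.pyRange_one_cons (show (j : Int) < (W : Int) by exact_mod_cast hjW)]
    rw [List.foldl_cons, innerStep_eval park H W i j hi hjW m]
    have e1 : ((j : Int) + 1) = (((j + 1 : Nat)) : Int) := by push_cast; ring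
    rw [e1, List.range'_succ, List.foldl_cons]
    exact ih (j+1) (max m (sRec park i j)) (by omega)

theorem outerLoop (park : List (List String)) (H W : Nat) :
    ∀ (t i m : Nat), i + t = H →
    (PySem.List.pyRange (i : Int) (H : Int) 1).foldl (fun st r =>
        (PySem.List.pyRange 0 (W : Int) 1).foldl (innerStep park r) st)
        (tabDp park H W i 0, ((m : Nat) : Int))
      = (tabDp park H W H 0,
          (((List.range' i t).foldl
              (fun m r => (List.range W).foldl (fun m c => max m (sRec park r c)) m) m : Nat) : Int)) := by
  intro t
  induction t with
  | zero =>
    intro i m hi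
    have hiH : i = H := by omega
    subst hiH
    rw [PySem.List.pyRange_one_eq_nil le_rfl]
    simp [List.range']
  | succ t ih =>
    intro i m hi
    have hiH : i < H := by omega
    rw [PySem.List.pyRange_one_cons (show (i : Int) < (H : Int) by exact_mod_cast hiH),
        List.foldl_cons]
    have hinner := innerLoop park H W i hiH W 0 m (by omega)
    simp only [Nat.cast_zero] at hinner
    rw [hinner]
    have e1 : ((i : Int) + 1) = (((i + 1 : Nat)) : Int) := by push_cast; ring
    rw [e1, List.range'_succ, List.foldl_cons, tab_row_roll park H W i]
    rw [← List.range_eq_range']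
    exact ih (i+1) _ (by omega)

def bigMax (park : List (List String)) (H W : Nat) : Nat :=
  (List.range H).foldl (fun m r => (List.range W).foldl (fun m c => max m (sRec park r c)) m) 0

theorem dp0_eq (park : List (List String)) (H W : Nat) :
    (PySem.List.pyRange 0 (H : Int) 1).map (fun _ => PySem.List.pyRepeat [(0 : Int)] (W : Int))
      = tabDp park H W 0 0 := by
  rw [PySem.List.pyRange_zero_nat, List.map_map, PySem.List.pyRepeat_singleton]
  unfold tabDp
  apply List.map_congr_left
  intro r _
  simp only [Function.comp, Int.toNat_natCast]
  have : ∀ c : Nat, (if r < 0 ∨ (r = 0 ∧ c < 0) then (sRec park r c : Int) else 0) = 0 := by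
    intro c
    rw [if_neg (by omega)]
  calc List.replicate W (0 : Int) = (List.range W).map (fun _ => (0 : Int)) := by
        rw [List.map_const']
        simp
    _ = (List.range W).map (fun c => if r < 0 ∨ (r = 0 ∧ c < 0) then (sRec park r c : Int) else 0) := by
        apply List.map_congr_left
        intro c _
        rw [this c]

theorem AfoldEq (park : List (List String)) (H W : Nat) :
    ((PySem.List.pyRange 0 (H : Int) 1).foldl (fun st r =>
        (PySem.List.pyRange 0 (W : Int) 1).foldl (innerStep park r) st)
        ((PySem.List.pyRange 0 (H : Int) 1).map (fun _ => PySem.List.pyRepeat [(0 : Int)] (W : Int)),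
          (0 : Int))).2
      = ((bigMax park H W : Nat) : Int) := by
  rw [dp0_eq park H W]
  have houter := outerLoop park H W H 0 0 (by omega)
  simp only [Nat.cast_zero] at houter
  rw [houter, ← List.range_eq_range']
  rfl

theorem cellE_pyCell (park : List (List String)) (x y : Nat) :
    (pyCell park (x : Int) (y : Int) == "-1") = cellE park x y := by
  unfold pyCell cellE
  rw [PySem.List.pyGetD_natCast, PySem.List.pyGetD_natCast]

theorem inner_mono {β : Type} (l : List β) (f : β → Nat) (m : Nat) :
    m ≤ l.foldl (fun m c => max m (f c)) m :=
  (PySem.List.le_foldl_max_nat l f m).1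

theorem outer_mono (park : List (List String)) (W : Nat) (rs : List Nat) :
    ∀ m : Nat, m ≤ rs.foldl (fun m r => (List.range W).foldl (fun m c => max m (sRec park r c)) m) m := by
  induction rs with
  | nil => intro m; simp
  | cons r rs ih =>
    intro m
    rw [List.foldl_cons]
    exact le_trans (inner_mono (List.range W) _ m) (ih _)

theorem outer_ge (park : List (List String)) (W : Nat) (rs : List Nat) :
    ∀ (m : Nat) (r : Nat), r ∈ rs → ∀ c < W,
      sRec park r c ≤ rs.foldl (fun m r => (List.range W).foldl (fun m c => max m (sRec park r c)) m) m := by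
  induction rs with
  | nil => intro m r hr; cases hr
  | cons a rs ih =>
    intro m r hr c hc
    rw [List.foldl_cons]
    rcases List.mem_cons.mp hr with h | h
    · subst h
      have h1 : sRec park r c ≤ (List.range W).foldl (fun m c => max m (sRec park r c)) m :=
        (PySem.List.le_foldl_max_nat (List.range W) _ m).2 c (List.mem_range.mpr hc)
      exact le_trans h1 (outer_mono park W rs _)
    · exact ih _ r h c hc

theorem sRec_le_bigMax (park : List (List String)) (H W i j : Nat) (hi : i < H) (hj : j < W) :
    sRec park i j ≤ bigMax park H W :=
  outer_ge park W (List.range H) 0 i (List.mem_range.mpr hi) j hj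

theorem inner_attain {β : Type} (l : List β) (f : β → Nat) :
    ∀ m : Nat, l.foldl (fun m c => max m (f c)) m = m ∨
      ∃ c ∈ l, l.foldl (fun m c => max m (f c)) m = f c := by
  induction l with
  | nil => intro m; exact Or.inl rfl
  | cons a l ih =>
    intro m
    rw [List.foldl_cons]
    rcases ih (max m (f a)) with h | ⟨c, hc, h⟩
    · rcases Nat.le_total (f a) m with hle | hle
      · rw [h, Nat.max_eq_left hle]
        exact Or.inl rfl
      · rw [h, Nat.max_eq_right hle]
        exact Or.inr ⟨a, List.mem_cons_self .., rfl⟩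
    · exact Or.inr ⟨c, List.mem_cons_of_mem a hc, h⟩

theorem outer_attain (park : List (List String)) (W : Nat) (rs : List Nat) :
    ∀ m : Nat, rs.foldl (fun m r => (List.range W).foldl (fun m c => max m (sRec park r c)) m) m = m ∨
      ∃ r ∈ rs, ∃ c < W,
        rs.foldl (fun m r => (List.range W).foldl (fun m c => max m (sRec park r c)) m) m
          = sRec park r c := by
  induction rs with
  | nil => intro m; exact Or.inl rfl
  | cons a rs ih =>
    intro m
    rw [List.foldl_cons]
    rcases ih ((List.range W).foldl (fun m c => max m (sRec park a c)) m) with h | ⟨r, hr, c, hc, h⟩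
    · rcases inner_attain (List.range W) (fun c => sRec park a c) m with h2 | ⟨c, hc, h2⟩
      · rw [h, h2]
        exact Or.inl rfl
      · rw [h, h2]
        exact Or.inr ⟨a, List.mem_cons_self .., c, List.mem_range.mp hc, rfl⟩
    · exact Or.inr ⟨r, List.mem_cons_of_mem a hr, c, hc, h⟩

theorem bigMax_le (park : List (List String)) (H W : Nat) : bigMax park H W ≤ min H W := by
  rcases outer_attain park W (List.range H) 0 with h | ⟨r, hr, c, hc, h⟩
  · rw [bigMax, h]; omega
  · rw [List.mem_range] at hr
    have h1 := sRec_le (park := park) r c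
    have : bigMax park H W = sRec park r c := h
    omega

theorem bigMax_attain (park : List (List String)) (H W : Nat) (h : 0 < bigMax park H W) :
    ∃ i < H, ∃ j < W, sRec park i j = bigMax park H W := by
  rcases outer_attain park W (List.range H) 0 with h2 | ⟨r, hr, c, hc, h2⟩
  · rw [bigMax] at h; omega
  · exact ⟨r, List.mem_range.mp hr, c, hc, h2.symm⟩

theorem anySquareB_iff (park : List (List String)) (H W k : Nat) (hk : 1 ≤ k) :
    (anySquareB park (H : Int) (W : Int) (k : Int) = true) ↔ k ≤ bigMax park H W := by
  unfold anySquareB fullSquareB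
  rw [List.any_eq_true]
  constructor
  · rintro ⟨i, hi, hrest⟩
    rw [List.any_eq_true] at hrest
    obtain ⟨j, hj, hfull⟩ := hrest
    rw [PySem.List.mem_pyRange_one] at hi hj
    have hi0 : 0 ≤ i := hi.1
    have hj0 : 0 ≤ j := hj.1
    set i' := i.toNat with hi'
    set j' := j.toNat with hj'
    have hie : i = (i' : Int) := by omega
    have hje : j = (j' : Int) := by omega
    have hiH : i' + k ≤ H := by omega
    have hjW : j' + k ≤ W := by omega
    have hcells : ∀ a < k, ∀ b < k, cellE park (i' + a) (j' + b) = true := by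
      intro a ha b hb
      rw [List.all_eq_true] at hfull
      have h1 := hfull (a : Int) (by rw [PySem.List.mem_pyRange_one]; omega)
      rw [List.all_eq_true] at h1
      have h2 := h1 (b : Int) (by rw [PySem.List.mem_pyRange_one]; omega)
      have e : i + (a : Int) = ((i' + a : Nat) : Int) := by omega
      have e2 : j + (b : Int) = ((j' + b : Nat) : Int) := by omega
      rw [e, e2, cellE_pyCell] at h2
      exact h2
    have hsq : sqE park (i' + k - 1) (j' + k - 1) k := by
      refine ⟨by omega, by omega, fun a ha b hb => ?_⟩
      have := hcells (k - 1 - a) (by omega) (k - 1 - b) (by omega)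
      have e : i' + k - 1 - a = i' + (k - 1 - a) := by omega
      have e2 : j' + k - 1 - b = j' + (k - 1 - b) := by omega
      rw [e, e2]
      exact this
    have h1 := le_sRec park (i' + k - 1) (j' + k - 1) k hsq
    have h2 := sRec_le_bigMax park H W (i' + k - 1) (j' + k - 1) (by omega) (by omega)
    omega
  · intro hle
    obtain ⟨I, hI, J, hJ, hIJ⟩ := bigMax_attain park H W (by omega)
    have hsq : sqE park I J k := sqE_mono park (hIJ ▸ sqE_sRec park I J) hle
    obtain ⟨hb1, hb2, hcells⟩ := hsq
    refine ⟨((I + 1 - k : Nat) : Int), ?_, ?_⟩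
    · rw [PySem.List.mem_pyRange_one]
      constructor
      · omega
      · omega
    · rw [List.any_eq_true]
      refine ⟨((J + 1 - k : Nat) : Int), ?_, ?_⟩
      · rw [PySem.List.mem_pyRange_one]
        constructor
        · omega
        · omega
      · rw [List.all_eq_true]
        intro a ha
        rw [PySem.List.mem_pyRange_one] at ha
        rw [List.all_eq_true]
        intro b hb
        rw [PySem.List.mem_pyRange_one] at hb
        set a' := a.toNat with ha'
        set b' := b.toNat with hb'
        have e : ((I + 1 - k : Nat) : Int) + a = ((I + 1 - k + a' : Nat) : Int) := by omega
        have e2 : ((J + 1 - k : Nat) : Int) + b = ((J + 1 - k + b' : Nat) : Int) := by omega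
        rw [e, e2, cellE_pyCell]
        have := hcells (k - 1 - a') (by omega) (k - 1 - b') (by omega)
        have e3 : I - (k - 1 - a') = I + 1 - k + a' := by omega
        have e4 : J - (k - 1 - b') = J + 1 - k + b' := by omega
        rw [e3, e4] at this
        exact this

theorem find?_countdown (p : Int → Bool) (B : Nat) :
    ∀ m : Nat, B ≤ m → (∀ k : Nat, 1 ≤ k → k ≤ m → ((p (k : Int) = true) ↔ k ≤ B)) →
    ((PySem.List.pyRange (m : Int) 0 (-1)).find? p).getD 0 = (B : Int) := by
  intro m
  induction m with
  | zero =>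
    intro h _
    rw [PySem.List.pyRange_neg_one_eq_nil (by norm_num)]
    simp only [List.find?_nil, Option.getD_none]
    omega
  | succ m ih =>
    intro h hp
    rw [PySem.List.pyRange_neg_one_cons (show (0 : Int) < ((m + 1 : Nat) : Int) by push_cast; omega)]
    by_cases hB : B = m + 1
    · have hp1 : p ((m + 1 : Nat) : Int) = true := (hp (m+1) (by omega) le_rfl).mpr (by omega)
      rw [List.find?_cons_of_pos hp1]
      simp [hB]
    · have hp1 : p ((m + 1 : Nat) : Int) = false := by
        by_cases hv : p ((m + 1 : Nat) : Int) = true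
        · have := (hp (m+1) (by omega) le_rfl).mp hv
          omega
        · simpa using hv
      rw [List.find?_cons_of_neg (by simpa using hp1)]
      have e : ((m + 1 : Nat) : Int) - 1 = ((m : Nat) : Int) := by push_cast; ring
      rw [e]
      exact ih (by omega) (fun k h1 h2 => hp k h1 (by omega))

theorem BfindEq (park : List (List String)) (H W : Nat) :
    ((PySem.List.pyRange (min (H : Int) (W : Int)) 0 (-1)).find? (anySquareB park (H : Int) (W : Int))).getD 0
      = ((bigMax park H W : Nat) : Int) := by
  have hmin : (min (H : Int) (W : Int)) = ((min H W : Nat) : Int) := by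
    simp [Nat.cast_min]
  rw [hmin]
  exact find?_countdown (anySquareB park (H : Int) (W : Int)) (bigMax park H W) (min H W)
    (bigMax_le park H W) (fun k h1 _ => anySquareB_iff park H W k h1)

theorem solution_eq (mats : List Int) (park : List (List String)) :
    solution mats park = solution_alt mats park := by
  unfold solution solution_alt
  simp only [PySem.List.len_eq]
  simp only [AfoldEq park park.length (PySem.List.pyGetD park 0 []).length,
      BfindEq park park.length (PySem.List.pyGetD park 0 []).length]

-- ===== VERDICT (by name: the statement is the Claim_ definition above) =====
theorem solution_spec : Claim_equal_solution := by
  intro mats park _hd _hp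
  unfold Spec_solution
  exact solution_eq mats park
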